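-- pv_equiv track=rewrite | github.com/AkshathRaghav/HackFromThePast | Captain Shinde's Conundrum/sol.py | process_test
-- ===== SOURCE A (Python) =====
-- def process_test(colors_sequence):
--     left = 0
--     right = 0
--
--     num_switches = 0
--
--     for i in range(len(colors_sequence)):
--         if colors_sequence[i] == left or colors_sequence[i] == right:
--             continue
--         else:
--             picked = False
--             for j in colors_sequence[i+1:]:
--                 if j == left:
--                     # pick right
--                     num_switches += 1
--                     right = colors_sequence[i]
--                     picked = True
--                     break
--                 elif j == right:
--                     # pick left
--                     num_switches += 1
--                     left = colors_sequence[i]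
--                     picked = True
--                     break
--                 else:
--                     continue
--
--             if not picked:
--                 # default left
--                 num_switches += 1
--                 left = colors_sequence[i]
--
--     return num_switches
-- ===== SOURCE B (Python) =====
-- def _next_after(occ, ptr, color, i):
--     lst = occ.get(color)
--     if lst is None:
--         return None
--     p = ptr.get(color, 0)
--     while p < len(lst) and lst[p] <= i:
--         p += 1
--     ptr[color] = p
--     return lst[p] if p < len(lst) else None
--
--
-- def process_test(colors_sequence):
--     occ = {}
--     for idx, c in enumerate(colors_sequence):
--         occ.setdefault(c, []).append(idx)
--     ptr = {}
--     left = 0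
--     right = 0
--     num_switches = 0
--     for i, c in enumerate(colors_sequence):
--         if c == left or c == right:
--             continue
--         num_switches += 1
--         nl = _next_after(occ, ptr, left, i)
--         nr = _next_after(occ, ptr, right, i)
--         if nl is not None and (nr is None or nl <= nr):
--             right = c
--         else:
--             left = c
--     return num_switches
-- ===== Notes on version B (the rewrite author's own statement) =====
-- stated objective: faster
-- what changed: Instead of rescanning the tail for the next occurrence of the current left/right colour at every switch (A's inner loop), B precomputes per-colour index lists once and answers each next-occurrence query with a monotone per-colour pointer that only ever advances, making the whole pass amortized linear.
import Mathlib
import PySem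

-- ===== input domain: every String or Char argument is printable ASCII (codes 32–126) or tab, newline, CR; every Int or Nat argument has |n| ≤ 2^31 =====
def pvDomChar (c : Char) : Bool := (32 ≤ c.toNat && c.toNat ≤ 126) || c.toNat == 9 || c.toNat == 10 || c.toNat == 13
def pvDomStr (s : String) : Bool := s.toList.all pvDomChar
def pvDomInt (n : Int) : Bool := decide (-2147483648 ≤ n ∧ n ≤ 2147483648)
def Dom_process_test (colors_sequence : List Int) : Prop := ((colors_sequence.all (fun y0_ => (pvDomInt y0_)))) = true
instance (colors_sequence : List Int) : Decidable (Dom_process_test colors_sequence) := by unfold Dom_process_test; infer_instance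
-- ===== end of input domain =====

-- B replaces A's quadratic rescans of the tail by precomputed per-colour index lists queried
-- with monotone pointers (amortized linear); same return value on every input.

-- ===== PORT A =====
-- inner 'for j in colors_sequence[i+1:]' loop: returns the new (left, right) after the switch
def pyAInner (left right ci : Int) : List Int → Int × Int
  | [] => (ci, right)                   -- not picked: default left = ci
  | j :: rest =>
    if j = left then (left, ci)         -- pick right
    else if j = right then (ci, right)  -- pick left
    else pyAInner left right ci rest

-- outer 'for i in range(len(...))' loop; the element at i and the slice [i+1:] are the head/tail
def pyALoop (left right num : Int) : List Int → Int
  | [] => num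
  | c :: rest =>
    if c = left ∨ c = right then pyALoop left right num rest
    else
      let lr := pyAInner left right c rest
      pyALoop lr.1 lr.2 (num + 1) rest

def process_test (colors_sequence : List Int) : Int :=
  pyALoop 0 0 0 colors_sequence

-- ===== PORT B =====
-- occ.setdefault(c, []).append(idx)
def bBuildOcc (colors : List Int) : PySem.Dict Int (List Int) :=
  (PySem.List.enumerate colors 0).foldl
    (fun occ p => occ.modify p.2 [] (fun l => l ++ [p.1])) PySem.Dict.empty

-- 'while p < len(lst) and lst[p] <= i: p += 1'
def bAdvance (lst : List Int) (i : Int) (p : Nat) : Nat :=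
  if h : p < lst.length then
    if lst[p] ≤ i then bAdvance lst i (p + 1) else p
  else p
  termination_by lst.length - p

-- _next_after(occ, ptr, color, i)
def bNextAfter (occ : PySem.Dict Int (List Int)) (ptr : PySem.Dict Int Nat)
    (color i : Int) : Option Int × PySem.Dict Int Nat :=
  match occ.get? color with
  | none => (none, ptr)
  | some lst =>
    let p := bAdvance lst i (ptr.getD color 0)
    (lst[p]?, ptr.insert color p)

-- 'nl is not None and (nr is None or nl <= nr)'
def bCond : Option Int → Option Int → Bool
  | some _, none => true
  | some nl, some nr => decide (nl ≤ nr)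
  | none, _ => false

-- 'for i, c in enumerate(colors_sequence)'
def bLoop (occ : PySem.Dict Int (List Int)) :
    List (Int × Int) → PySem.Dict Int Nat → Int → Int → Int → Int
  | [], _, _, _, num => num
  | (i, c) :: rest, ptr, left, right, num =>
    if c = left ∨ c = right then bLoop occ rest ptr left right num
    else
      let nlp := bNextAfter occ ptr left i
      let nrp := bNextAfter occ nlp.2 right i
      if bCond nlp.1 nrp.1 then bLoop occ rest nrp.2 left c (num + 1)
      else bLoop occ rest nrp.2 c right (num + 1)

def process_test_alt (colors_sequence : List Int) : Int :=
  bLoop (bBuildOcc colors_sequence) (PySem.List.enumerate colors_sequence 0)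
    PySem.Dict.empty 0 0 0

-- ===== PRECONDITION & SPEC =====
def Spec_process_test (colors_sequence : List Int) (out : Int) : Prop := out = process_test_alt colors_sequence
instance (colors_sequence : List Int) (out : Int) : Decidable (Spec_process_test colors_sequence out) := by unfold Spec_process_test; infer_instance

-- ===== CLAIM (what is proved, stated in full; the proofs are below) =====
def Claim_equal_process_test : Prop := ∀ (colors_sequence : List Int), Dom_process_test colors_sequence → Spec_process_test colors_sequence (process_test colors_sequence)

-- ===== LEMMAS AND PROOFS =====

-- proof-only helpers
def selIdx (c : Int) (p : Int × Int) : Option Int := if p.2 = c then some p.1 else none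

-- list of indices at which colour c occurs (what B's occ dict stores under key c)
def occList (colors : List Int) (c : Int) : List Int :=
  (PySem.List.enumerate colors 0).filterMap (selIdx c)

-- first index > i at which colour c occurs
def specNext (colors : List Int) (i c : Int) : Option Int :=
  (occList colors c).find? (fun x => decide (i < x))

-- first enumerate-index (starting at s) of colour v in a suffix
def restNext (rest : List Int) (s v : Int) : Option Int :=
  ((PySem.List.enumerate rest s).find? (fun p => p.2 == v)).map (·.1)

-- pointer invariant: every entry skipped so far has value ≤ b
def PtrInv (colors : List Int) (ptr : PySem.Dict Int Nat) (b : Int) : Prop :=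
  ∀ c p, ptr.get? c = some p → p ≤ (occList colors c).length ∧
    ∀ q x, q < p → (occList colors c)[q]? = some x → x ≤ b

lemma Inv_mono {colors ptr b b'} (h : b ≤ b') (hI : PtrInv colors ptr b) : PtrInv colors ptr b' := by
  intro c p hp
  obtain ⟨h1, h2⟩ := hI c p hp
  exact ⟨h1, fun q x hq hx => le_trans (h2 q x hq hx) h⟩

lemma foldl_modify_getD (ps : List (Int × Int)) (d : PySem.Dict Int (List Int)) (c : Int) :
    (ps.foldl (fun occ p => occ.modify p.2 [] (fun l => l ++ [p.1])) d).getD c [] =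
    d.getD c [] ++ ps.filterMap (selIdx c) := by
  induction ps generalizing d with
  | nil => simp
  | cons p ps ih =>
    rw [List.foldl_cons, ih, List.filterMap_cons]
    by_cases hc : p.2 = c
    · subst hc
      rw [PySem.Dict.getD_modify_self]
      simp [selIdx]
    · rw [PySem.Dict.getD_modify_of_ne _ _ _ (Ne.symm hc)]
      simp [selIdx, hc]

lemma buildOcc_getD (colors : List Int) (c : Int) :
    (bBuildOcc colors).getD c [] = occList colors c := by
  rw [bBuildOcc, foldl_modify_getD, occList]
  rfl

lemma find?_prefix_fail {α : Type} (p : α → Bool) (n : Nat) :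
    ∀ (l : List α), (∀ q x, q < n → l[q]? = some x → p x = false) →
      l.find? p = (l.drop n).find? p := by
  induction n with
  | zero => intro l _; simp
  | succ m ih =>
    intro l hl
    cases l with
    | nil => simp
    | cons a l' =>
      have ha : p a = false := hl 0 a (Nat.succ_pos m) rfl
      have : (a :: l').find? p = l'.find? p := by simp [List.find?, ha]
      rw [this, List.drop_succ_cons]
      exact ih l' (fun q x hq hx => hl (q + 1) x (by omega) (by simpa using hx))

lemma bAdvance_spec (lst : List Int) (i : Int) (p0 : Nat) (h0 : p0 ≤ lst.length)
    (hpre : ∀ q x, q < p0 → lst[q]? = some x → x ≤ i) :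
    bAdvance lst i p0 ≤ lst.length ∧
    (∀ q x, q < bAdvance lst i p0 → lst[q]? = some x → x ≤ i) ∧
    lst[bAdvance lst i p0]? = lst.find? (fun x => decide (i < x)) := by
  fun_induction bAdvance lst i p0 with
  | case1 p h hle ih =>
    exact ih (by omega) (fun q x hq hx => by
      rcases Nat.lt_succ_iff_lt_or_eq.mp hq with h' | h'
      · exact hpre q x h' hx
      · subst h'; rw [List.getElem?_eq_getElem h] at hx
        cases hx; exact hle)
  | case2 p h hle =>
    refine ⟨le_of_lt h, hpre, ?_⟩
    rw [find?_prefix_fail _ p lst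
      (fun q x hq hx => by simpa using not_lt.mpr (hpre q x hq hx)),
      List.drop_eq_getElem_cons h]
    simp [List.find?, not_le.mp hle, List.getElem?_eq_getElem h]
  | case3 p h =>
    have hp : p = lst.length := by omega
    subst hp
    refine ⟨le_refl _, hpre, ?_⟩
    rw [List.getElem?_eq_none (by omega), eq_comm, List.find?_eq_none]
    intro x hx
    obtain ⟨q, hq, rfl⟩ := List.mem_iff_getElem.mp hx
    simpa using not_lt.mpr (hpre q _ hq (List.getElem?_eq_getElem hq))

lemma bNextAfter_spec (colors : List Int) (ptr : PySem.Dict Int Nat) (color i b : Int)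
    (hb : b ≤ i) (hInv : PtrInv colors ptr b) :
    (bNextAfter (bBuildOcc colors) ptr color i).1 = specNext colors i color ∧
    PtrInv colors (bNextAfter (bBuildOcc colors) ptr color i).2 i := by
  have hocc := buildOcc_getD colors color
  have hgetD : ∀ (d : PySem.Dict Int (List Int)) k,
      d.getD k [] = (d.get? k).getD [] := fun _ _ => rfl
  have hgetDN : ∀ (d : PySem.Dict Int Nat) k,
      d.getD k 0 = (d.get? k).getD 0 := fun _ _ => rfl
  cases hg : (bBuildOcc colors).get? color with
  | none =>
    have hnil : occList colors color = [] := by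
      rw [← hocc, hgetD, hg]
      rfl
    simp only [bNextAfter, hg]
    exact ⟨by simp [specNext, hnil], Inv_mono hb hInv⟩
  | some lst =>
    have hlst : lst = occList colors color := by
      rw [← hocc, hgetD, hg]
      rfl
    have h0 : ptr.getD color 0 ≤ lst.length ∧
        ∀ q x, q < ptr.getD color 0 → lst[q]? = some x → x ≤ i := by
      cases hpg : ptr.get? color with
      | none => simp [hgetDN, hpg]
      | some p =>
        obtain ⟨ha, hb'⟩ := hInv color p hpg
        rw [← hlst] at ha hb'
        rw [hgetDN, hpg]
        exact ⟨ha, fun q x hq hx => le_trans (hb' q x hq hx) hb⟩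
    obtain ⟨hlen, hmid, hfind⟩ := bAdvance_spec lst i (ptr.getD color 0) h0.1 h0.2
    simp only [bNextAfter, hg]
    refine ⟨?_, ?_⟩
    · rw [hfind, specNext, ← hlst]
    · intro c' p' hp'
      by_cases hc : c' = color
      · subst hc
        rw [PySem.Dict.get?_insert_self] at hp'
        cases hp'
        rw [← hlst]
        exact ⟨hlen, hmid⟩
      · rw [PySem.Dict.get?_insert_of_ne _ _ hc] at hp'
        exact Inv_mono hb hInv c' p' hp'

lemma find?_filterMap_sel (c i : Int) : ∀ (ps : List (Int × Int)),
    (ps.filterMap (selIdx c)).find? (fun x => decide (i < x)) =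
    (ps.find? (fun p => decide (i < p.1) && (p.2 == c))).map (·.1) := by
  intro ps
  induction ps with
  | nil => simp
  | cons p ps ih =>
    by_cases hc : p.2 = c
    · have hsel : selIdx c p = some p.1 := by simp [selIdx, hc]
      by_cases hi : i < p.1
      · rw [List.filterMap_cons, hsel,
          List.find?_cons_of_pos (by simpa using hi),
          List.find?_cons_of_pos (by simp [hc, hi])]
        rfl
      · rw [List.filterMap_cons, hsel,
          List.find?_cons_of_neg (by simpa using hi),
          List.find?_cons_of_neg (by simp [hi]), ih]
    · have hsel : selIdx c p = none := by simp [selIdx, hc]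
      rw [List.filterMap_cons, hsel,
        List.find?_cons_of_neg (by simp [hc]), ih]

lemma fst_enum_bounds {xs : List Int} {s : Int} {p : Int × Int}
    (hp : p ∈ PySem.List.enumerate xs s) : s ≤ p.1 ∧ p.1 < s + xs.length := by
  have h1 : p.1 ∈ (PySem.List.enumerate xs s).map (·.1) := List.mem_map_of_mem hp
  rw [PySem.List.map_fst_enumerate] at h1
  exact PySem.List.mem_pyRange_one.mp h1

lemma find?_congr_mem {α : Type} {l : List α} {p q : α → Bool}
    (h : ∀ x ∈ l, p x = q x) : l.find? p = l.find? q := by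
  induction l with
  | nil => rfl
  | cons a l ih =>
    have ha := h a (List.mem_cons_self)
    simp only [List.find?, ha]
    cases q a
    · exact ih (fun x hx => h x (List.mem_cons_of_mem a hx))
    · rfl

lemma specNext_eq_restNext (colors : List Int) (k : Nat) (v : Int) (hk : k < colors.length) :
    specNext colors (k : Int) v = restNext (colors.drop (k + 1)) ((k : Int) + 1) v := by
  unfold specNext occList restNext
  rw [find?_filterMap_sel]
  have hlen : (colors.take (k + 1)).length = k + 1 := by rw [List.length_take]; omega
  conv_lhs => rw [← List.take_append_drop (k + 1) colors]
  rw [PySem.List.enumerate_append, List.find?_append]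
  have h1 : List.find? (fun p => decide ((k : Int) < p.1) && (p.2 == v))
      (PySem.List.enumerate (colors.take (k + 1)) 0) = none := by
    rw [List.find?_eq_none]
    intro p hp
    have hb := (fst_enum_bounds hp).2
    rw [hlen] at hb
    simp only [Bool.and_eq_true, decide_eq_true_eq, not_and]
    intro h2
    omega
  have h2 : ∀ p ∈ PySem.List.enumerate (colors.drop (k + 1))
      (0 + ((colors.take (k + 1)).length : Int)),
      (decide ((k : Int) < p.1) && (p.2 == v)) = (p.2 == v) := by
    intro p hp
    have hb := (fst_enum_bounds hp).1
    rw [hlen] at hb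
    have hk' : (k : Int) < p.1 := by push_cast at hb; omega
    simp [hk']
  rw [h1, Option.none_or, find?_congr_mem h2, hlen]
  norm_num

lemma restNext_ge {rest : List Int} {s v m : Int} (h : restNext rest s v = some m) : s ≤ m := by
  unfold restNext at h
  obtain ⟨q, hq, hqm⟩ := Option.map_eq_some_iff.mp h
  subst hqm
  exact (fst_enum_bounds (List.mem_of_find?_eq_some hq)).1

lemma aInner_eq (l r c : Int) : ∀ (rest : List Int) (s : Int),
    pyAInner l r c rest =
      (if bCond (restNext rest s l) (restNext rest s r) then (l, c) else (c, r)) := by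
  intro rest
  induction rest with
  | nil => intro s; simp [pyAInner, restNext, PySem.List.enumerate_nil, bCond]
  | cons j rest ih =>
    intro s
    have hcons : ∀ v : Int, j ≠ v →
        restNext (j :: rest) s v = restNext rest (s + 1) v := by
      intro v hv
      unfold restNext
      rw [PySem.List.enumerate_cons, List.find?_cons_of_neg (by simp [hv])]
    by_cases hjl : j = l
    · have hfl : restNext (j :: rest) s l = some s := by
        unfold restNext
        rw [PySem.List.enumerate_cons, List.find?_cons_of_pos (by simp [hjl])]
        rfl
      rw [hfl]
      have hcond : bCond (some s) (restNext (j :: rest) s r) = true := by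
        by_cases hjr : j = r
        · have hfr : restNext (j :: rest) s r = some s := by
            unfold restNext
            rw [PySem.List.enumerate_cons, List.find?_cons_of_pos (by simp [hjr])]
            rfl
          simp [hfr, bCond]
        · rw [hcons r hjr]
          cases hm : restNext rest (s + 1) r with
          | none => rfl
          | some m =>
            have hge := restNext_ge hm
            simp only [bCond, decide_eq_true_eq]
            omega
      rw [hcond, if_pos rfl]
      simp [pyAInner, hjl]
    · by_cases hjr : j = r
      · have hfr : restNext (j :: rest) s r = some s := by
          unfold restNext
          rw [PySem.List.enumerate_cons, List.find?_cons_of_pos (by simp [hjr])]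
          rfl
        rw [hcons l hjl, hfr]
        have hcond : bCond (restNext rest (s + 1) l) (some s) = false := by
          cases hm : restNext rest (s + 1) l with
          | none => rfl
          | some m =>
            have hge := restNext_ge hm
            simp only [bCond, decide_eq_false_iff_not]
            omega
        rw [hcond, if_neg (by simp)]
        simp only [pyAInner, if_neg hjl, if_pos hjr]
      · rw [hcons l hjl, hcons r hjr]
        simp only [pyAInner, if_neg hjl, if_neg hjr]
        exact ih (s + 1)

lemma loop_eq (colors : List Int) :
    ∀ (t : List Int) (k : Nat) (ptr : PySem.Dict Int Nat) (l r num : Int),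
      t = colors.drop k → PtrInv colors ptr (k : Int) →
      bLoop (bBuildOcc colors) (PySem.List.enumerate t (k : Int)) ptr l r num =
      pyALoop l r num t := by
  intro t
  induction t with
  | nil =>
    intro k ptr l r num ht hInv
    simp [PySem.List.enumerate_nil, bLoop, pyALoop]
  | cons c rest ih =>
    intro k ptr l r num ht hInv
    have hk : k < colors.length := by
      by_contra h
      rw [List.drop_eq_nil_of_le (by omega)] at ht
      exact absurd ht (by simp)
    have hrest : rest = colors.drop (k + 1) := by
      have h := congrArg List.tail ht
      simpa [List.tail_drop] using h
    have hcast : ((k : Int) + 1) = ((k + 1 : Nat) : Int) := by push_cast; ring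
    have hInv' : PtrInv colors ptr ((k + 1 : Nat) : Int) :=
      Inv_mono (by push_cast; omega) hInv
    rw [PySem.List.enumerate_cons]
    simp only [bLoop, pyALoop]
    by_cases hc : c = l ∨ c = r
    · rw [if_pos hc, if_pos hc, hcast]
      exact ih (k + 1) ptr l r num hrest hInv'
    · rw [if_neg hc, if_neg hc]
      obtain ⟨hnl, hInv1⟩ := bNextAfter_spec colors ptr l (k : Int) (k : Int) le_rfl hInv
      obtain ⟨hnr, hInv2⟩ := bNextAfter_spec colors
        (bNextAfter (bBuildOcc colors) ptr l (k : Int)).2 r (k : Int) (k : Int) le_rfl hInv1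
      rw [hnl, hnr, specNext_eq_restNext colors k l hk, specNext_eq_restNext colors k r hk,
        ← hrest, aInner_eq l r c rest ((k : Int) + 1)]
      have hInv2' : PtrInv colors
          (bNextAfter (bBuildOcc colors) (bNextAfter (bBuildOcc colors) ptr l (k : Int)).2
            r (k : Int)).2 ((k + 1 : Nat) : Int) :=
        Inv_mono (by push_cast; omega) hInv2
      by_cases hbc : bCond (restNext rest ((k : Int) + 1) l) (restNext rest ((k : Int) + 1) r) = true
      · rw [if_pos hbc, if_pos hbc, hcast]
        exact ih (k + 1) _ l c (num + 1) hrest hInv2'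
      · rw [if_neg hbc, if_neg hbc, hcast]
        exact ih (k + 1) _ c r (num + 1) hrest hInv2'

-- ===== VERDICT (by name: the statement is the Claim_ definition above) =====
theorem process_test_spec : Claim_equal_process_test := by
  intro colors _
  unfold Spec_process_test process_test process_test_alt
  simpa using (loop_eq colors colors 0 PySem.Dict.empty 0 0 0 (by simp)
    (by intro c p h; simp [PySem.Dict.get?, PySem.Dict.empty] at h)).symm
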